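-- pv_equiv track=rewrite | github.com/mantidproject/mantid | qt/applications/workbench/workbench/widgets/plotselector/presenter.py | _make_unique_name
-- ===== SOURCE A (Python) =====
-- def _make_unique_name(name, dictionary):
--     """
--     Given a name and a dictionary, make a unique name that does
--     not already exist in the dictionary values by appending
--     ' (1)', ' (2)', ' (3)' etc. to the end of the name
--     :param name: A string with the non-unique name
--     :param dictionary: A dictionary with string values
--     :return : The unique plot name
--     """
--     i = 1
--     while True:
--         plot_name_attempt = name + ' ({})'.format(str(i))
--         if plot_name_attempt not in dictionary.values():
--             break
--         i += 1
--
--     return plot_name_attempt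
-- ===== SOURCE B (Python) =====
-- def _make_unique_name(name, dictionary):
--     """Index the suffix numbers already used once, then take the first gap."""
--     prefix = name + ' ('
--     nums = (_suffix_num(prefix, value) for value in dictionary.values())
--     taken = {n for n in nums if n is not None}
--     expected = 1
--     for t in sorted(taken):
--         if t == expected:
--             expected += 1
--         elif t > expected:
--             break
--     return name + ' ({})'.format(expected)
--
--
-- def _suffix_num(prefix, value):
--     """The n >= 1 with value == prefix + str(n) + ')', canonically written; else None."""
--     if not (value.startswith(prefix) and value.endswith(')')):
--         return None
--     mid = value[len(prefix):-1]
--     if not mid or not mid.isdigit() or mid[0] == '0':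
--         return None
--     n = 0
--     for ch in mid:
--         n = 10 * n + (ord(ch) - ord('0'))
--     return n
-- ===== Notes on version B (the rewrite author's own statement) =====
-- stated objective: alternative
-- what changed: Instead of testing candidate strings 'name (1)', 'name (2)', ... against dictionary.values() again and again, B makes one pass over the values, parses each value of the exact form name + ' (n)' (positive n, no leading zeros) into a set of taken suffix numbers, and then finds the smallest free number by a gap scan over the sorted set.
import Mathlib
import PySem

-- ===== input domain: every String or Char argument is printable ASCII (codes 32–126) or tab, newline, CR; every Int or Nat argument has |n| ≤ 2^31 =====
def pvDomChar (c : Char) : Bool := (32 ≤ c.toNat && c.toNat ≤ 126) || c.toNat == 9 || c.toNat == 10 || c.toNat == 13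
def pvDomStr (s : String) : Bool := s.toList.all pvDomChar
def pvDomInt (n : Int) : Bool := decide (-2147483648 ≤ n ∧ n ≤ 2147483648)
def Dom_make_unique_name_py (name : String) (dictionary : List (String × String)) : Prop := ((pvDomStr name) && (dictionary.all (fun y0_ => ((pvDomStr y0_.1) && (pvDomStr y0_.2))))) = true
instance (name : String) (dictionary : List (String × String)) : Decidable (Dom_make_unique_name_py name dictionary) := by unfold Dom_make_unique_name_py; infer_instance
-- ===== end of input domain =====

-- Alternative algorithm: B replaces A's repeated scans of dictionary.values() (one per
-- candidate 'name (i)') by one parsing pass that collects the taken suffix numbers into a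
-- set, then a gap scan over the sorted set; the return value is proved identical, and
-- neither version mutates its arguments.

-- ===== PORT A =====
-- A's 'while True' loop; the fuel argument only makes the recursion total: the proof below
-- shows the loop always exits before values.length + 1 iterations, so the fuel-0 branch is
-- never the one that decides the result.
def pvLoopA (values : List String) (name : String) : Int → Nat → String
  | i, 0 => name ++ " (" ++ PySem.Int.toStr i ++ ")"
  | i, fuel + 1 =>
    -- plot_name_attempt = name + ' ({})'.format(str(i))
    let attempt := name ++ " (" ++ PySem.Int.toStr i ++ ")"
    if attempt ∈ values then pvLoopA values name (i + 1) fuel else attempt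

def make_unique_name_py (name : String) (dictionary : List (String × String)) : String :=
  let values := (PySem.Dict.ofList dictionary).values
  pvLoopA values name 1 (values.length + 1)

-- ===== PORT B =====
-- port of Source B's _suffix_num; startswith/endswith/slice are taken on the character list
-- (exact: value[len(prefix):-1] with prefix a prefix of value is drop-then-dropLast)
-- the digit checks on mid and the manual decimal accumulation of Source B
def pvMidNum (mid : List Char) : Option Int :=
  if (!mid.isEmpty) && mid.all PySem.Chars.isdigit && (mid.head? != some '0') then
    -- n = 0; for ch in mid: n = 10 * n + (ord(ch) - ord('0'))
    some (mid.foldl (fun a c => 10 * a + ((c.toNat : Int) - 48)) 0)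
  else none

def pvSuffixNum (pre : List Char) (value : String) : Option Int :=
  if pre.isPrefixOf value.toList && (value.toList.getLast? == some ')') then
    pvMidNum ((value.toList.drop pre.length).dropLast)
  else none

-- 'expected = 1; for t in sorted(taken): ...' with the break as an early return
def pvGapScan : Int → List Int → Int
  | expected, [] => expected
  | expected, t :: ts =>
    if t = expected then pvGapScan (expected + 1) ts
    else if expected < t then expected
    else pvGapScan expected ts

def make_unique_name_py_alt (name : String) (dictionary : List (String × String)) : String :=
  let pre := name.toList ++ [' ', '(']
  let taken := PySem.Set.ofList (((PySem.Dict.ofList dictionary).values).filterMap (pvSuffixNum pre))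
  let expected := pvGapScan 1 (PySem.List.sorted taken (fun x => x) false)
  name ++ " (" ++ PySem.Int.toStr expected ++ ")"

-- ===== PRECONDITION & SPEC =====
def Spec_make_unique_name_py (name : String) (dictionary : List (String × String)) (out : String) : Prop := out = make_unique_name_py_alt name dictionary
instance (name : String) (dictionary : List (String × String)) (out : String) : Decidable (Spec_make_unique_name_py name dictionary out) := by unfold Spec_make_unique_name_py; infer_instance

-- ===== CLAIM (what is proved, stated in full; the proofs are below) =====
def Claim_equal_make_unique_name_py : Prop := ∀ (name : String) (dictionary : List (String × String)), Dom_make_unique_name_py name dictionary → Spec_make_unique_name_py name dictionary (make_unique_name_py name dictionary)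

-- ===== LEMMAS AND PROOFS =====

-- decimal value of a digit list over Nat (proof-side twin of the Int fold in pvSuffixNum)
def pvDecNat (cs : List Char) : Nat := cs.foldl (fun a c => 10 * a + (c.toNat - 48)) 0

lemma pv_isdigit_iff (c : Char) : PySem.Chars.isdigit c = true ↔ 48 ≤ c.toNat ∧ c.toNat ≤ 57 := by
  unfold PySem.Chars.isdigit
  simp only [Bool.and_eq_true, decide_eq_true_eq, Char.le_def, UInt32.le_iff_toNat_le]
  exact Iff.rfl

lemma pv_char_eq_of_toNat {c c' : Char} (h : c.toNat = c'.toNat) : c = c' := by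
  apply Char.ext
  apply UInt32.toNat_inj.mp
  exact h

lemma pv_digitChar_toNat {d : Nat} (h : d < 10) : (Nat.digitChar d).toNat = 48 + d := by
  interval_cases d <;> rfl

lemma pv_digitChar_of_digit {c : Char} (h : PySem.Chars.isdigit c = true) :
    Nat.digitChar (c.toNat - 48) = c := by
  have hb := (pv_isdigit_iff c).mp h
  apply pv_char_eq_of_toNat
  rw [pv_digitChar_toNat (by omega)]
  omega

lemma pv_foldNat_toDigits (m : Nat) : ∀ a : Nat,
    (Nat.toDigits 10 m).foldl (fun a c => 10 * a + (c.toNat - 48)) a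
      = a * 10 ^ (Nat.toDigits 10 m).length + m := by
  induction m using Nat.strong_induction_on with
  | _ m ih =>
    intro a
    by_cases hm : m < 10
    · rw [Nat.toDigits_of_lt_base hm]
      simp only [List.foldl_cons, List.foldl_nil, List.length_cons, List.length_nil]
      rw [pv_digitChar_toNat hm]
      omega
    · have h10 : (10 : Nat) ≤ m := Nat.le_of_not_lt hm
      rw [Nat.toDigits_of_base_le (by norm_num) h10, List.foldl_append, List.length_append]
      simp only [List.foldl_cons, List.foldl_nil, List.length_cons, List.length_nil, Nat.zero_add]
      rw [ih (m / 10) (Nat.div_lt_self (by omega) (by norm_num)) a,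
        pv_digitChar_toNat (Nat.mod_lt m (by norm_num)), pow_succ]
      have hdm := Nat.div_add_mod m 10
      set Q := a * 10 ^ (Nat.toDigits 10 (m / 10)).length with hQ
      have hx : a * (10 ^ (Nat.toDigits 10 (m / 10)).length * 10) = Q * 10 := by rw [hQ]; ring
      rw [hx]
      omega

lemma pv_toDigits_all_digit (m : Nat) : ∀ c ∈ Nat.toDigits 10 m, PySem.Chars.isdigit c = true := by
  intro c hc
  have hd := Nat.isDigit_of_mem_toDigits (by norm_num) (by norm_num) hc
  simp only [Char.isDigit, ge_iff_le, Bool.and_eq_true, decide_eq_true_eq,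
    UInt32.le_iff_toNat_le] at hd
  rw [pv_isdigit_iff]
  exact ⟨hd.1, hd.2⟩

lemma pv_toDigits_head_ne_zero {m : Nat} (h : m ≠ 0) : (Nat.toDigits 10 m).head? ≠ some '0' := by
  induction m using Nat.strong_induction_on with
  | _ m ih =>
    by_cases hm : m < 10
    · rw [Nat.toDigits_of_lt_base hm]
      simp only [List.head?_cons, ne_eq, Option.some.injEq]
      intro heq
      have := congrArg Char.toNat heq
      rw [pv_digitChar_toNat hm] at this
      simp [Char.toNat] at this
      omega
    · have h10 : (10 : Nat) ≤ m := Nat.le_of_not_lt hm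
      rw [Nat.toDigits_of_base_le (by norm_num) h10,
        List.head?_append_of_ne_nil _ (List.ne_nil_of_length_pos Nat.length_toDigits_pos)]
      exact ih (m / 10) (Nat.div_lt_self (by omega) (by norm_num)) (by omega)

lemma pv_toDigits_decNat (m : Nat) : pvDecNat (Nat.toDigits 10 m) = m := by
  unfold pvDecNat
  rw [pv_foldNat_toDigits m 0]
  simp

-- the fold never decreases
lemma pv_foldNat_ge (cs : List Char) : ∀ a : Nat,
    a ≤ cs.foldl (fun a c => 10 * a + (c.toNat - 48)) a := by
  induction cs with
  | nil => intro a; simp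
  | cons c rest ih =>
    intro a
    simp only [List.foldl_cons]
    exact le_trans (by omega) (ih (10 * a + (c.toNat - 48)))

lemma pv_decNat_pos {cs : List Char} (h1 : cs ≠ []) (h2 : ∀ c ∈ cs, PySem.Chars.isdigit c = true)
    (h3 : cs.head? ≠ some '0') : 1 ≤ pvDecNat cs := by
  obtain ⟨c, rest, rfl⟩ := List.exists_cons_of_ne_nil h1
  have hc := (pv_isdigit_iff c).mp (h2 c (List.mem_cons_self))
  have hc0 : c ≠ '0' := by
    intro heq; subst heq; simp only [List.head?_cons] at h3; exact h3 rfl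
  have hne : c.toNat ≠ 48 := by
    intro heq
    exact hc0 (pv_char_eq_of_toNat (heq.trans rfl))
  unfold pvDecNat
  simp only [List.foldl_cons]
  calc 1 ≤ 10 * 0 + (c.toNat - 48) := by omega
    _ ≤ _ := pv_foldNat_ge rest _

lemma pv_decNat_toDigits {cs : List Char} (h1 : cs ≠ [])
    (h2 : ∀ c ∈ cs, PySem.Chars.isdigit c = true) (h3 : cs.head? ≠ some '0') :
    Nat.toDigits 10 (pvDecNat cs) = cs := by
  induction cs using List.reverseRecOn with
  | nil => exact absurd rfl h1
  | append_singleton ys c ih =>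
    have hc := (pv_isdigit_iff c).mp (h2 c (by simp))
    have hstep : pvDecNat (ys ++ [c]) = 10 * pvDecNat ys + (c.toNat - 48) := by
      unfold pvDecNat
      rw [List.foldl_append]
      rfl
    have hd : c.toNat - 48 < 10 := by omega
    by_cases hys : ys = []
    · subst hys
      simp only [List.nil_append] at hstep ⊢
      rw [hstep]
      have h0 : 10 * pvDecNat [] + (c.toNat - 48) = c.toNat - 48 := by simp [pvDecNat]
      rw [h0, Nat.toDigits_of_lt_base hd, pv_digitChar_of_digit (h2 c (by simp))]
    · have h2' : ∀ x ∈ ys, PySem.Chars.isdigit x = true := fun x hx => h2 x (by simp [hx])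
      have h3' : ys.head? ≠ some '0' := by
        rwa [List.head?_append_of_ne_nil _ hys] at h3
      have hpos : 0 < pvDecNat ys := pv_decNat_pos hys h2' h3'
      rw [hstep, ← Nat.toDigits_append_toDigits (b := 10) (by norm_num) hpos hd,
        ih hys h2' h3', Nat.toDigits_of_lt_base hd, pv_digitChar_of_digit (h2 c (by simp))]

lemma pv_foldInt_eq_foldNat (cs : List Char) (h : ∀ c ∈ cs, PySem.Chars.isdigit c = true) :
    ∀ a : Nat, cs.foldl (fun a c => 10 * a + ((c.toNat : Int) - 48)) (a : Int)
      = ((cs.foldl (fun a c => 10 * a + (c.toNat - 48)) a : Nat) : Int) := by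
  induction cs with
  | nil => intro a; simp
  | cons c rest ih =>
    intro a
    have hc := (pv_isdigit_iff c).mp (h c List.mem_cons_self)
    have h' : ∀ x ∈ rest, PySem.Chars.isdigit x = true := fun x hx => h x (by simp [hx])
    simp only [List.foldl_cons]
    have hcast : 10 * (a : Int) + ((c.toNat : Int) - 48) = ((10 * a + (c.toNat - 48) : Nat) : Int) := by
      push_cast [Nat.cast_sub (by omega : 48 ≤ c.toNat)]
      ring
    rw [hcast, ih h']

lemma pv_toList_encode (name : String) (i : Int) :
    (name ++ " (" ++ PySem.Int.toStr i ++ ")").toList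
      = (name.toList ++ [' ', '(']) ++ PySem.Int.toChars i ++ [')'] := by
  simp only [String.toList_append, PySem.Int.toList_toStr]
  have h1 : " (".toList = [' ', '('] := rfl
  have h2 : ")".toList = [')'] := rfl
  rw [h1, h2]

lemma pv_toChars_pos {i : Int} (h : 1 ≤ i) : PySem.Int.toChars i = Nat.toDigits 10 i.toNat := by
  unfold PySem.Int.toChars
  rw [if_neg (by omega)]

lemma pv_parse_encode (name : String) {i : Int} (h : 1 ≤ i) :
    pvSuffixNum (name.toList ++ [' ', '(']) (name ++ " (" ++ PySem.Int.toStr i ++ ")") = some i := by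
  have hml : i.toNat ≠ 0 := by omega
  have hdd : Nat.toDigits 10 i.toNat ≠ [] := List.ne_nil_of_length_pos Nat.length_toDigits_pos
  unfold pvSuffixNum pvMidNum
  rw [pv_toList_encode, pv_toChars_pos h,
    List.append_assoc (name.toList ++ [' ', '(']) (Nat.toDigits 10 i.toNat) [')']]
  rw [if_pos, List.drop_left, List.dropLast_concat, if_pos]
  · have hfold := pv_foldInt_eq_foldNat (Nat.toDigits 10 i.toNat) (pv_toDigits_all_digit i.toNat) 0
    simp only [Nat.cast_zero] at hfold
    rw [hfold]
    have : (Nat.toDigits 10 i.toNat).foldl (fun a c => 10 * a + (c.toNat - 48)) 0 = i.toNat :=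
      pv_toDigits_decNat i.toNat
    rw [this, Int.toNat_of_nonneg (by omega)]
  · simp only [Bool.and_eq_true, Bool.not_eq_true', List.isEmpty_eq_false_iff, bne_iff_ne, ne_eq]
    refine ⟨⟨hdd, ?_⟩, ?_⟩
    · rw [List.all_eq_true]
      intro c hc
      exact pv_toDigits_all_digit i.toNat c hc
    · exact pv_toDigits_head_ne_zero hml
  · simp only [Bool.and_eq_true, List.isPrefixOf_iff_prefix, beq_iff_eq]
    constructor
    · exact ⟨Nat.toDigits 10 i.toNat ++ [')'], rfl⟩
    · rw [← List.append_assoc, List.getLast?_concat]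

lemma pv_parse_sound {name : String} {v : String} {n : Int}
    (h : pvSuffixNum (name.toList ++ [' ', '(']) v = some n) :
    1 ≤ n ∧ v = name ++ " (" ++ PySem.Int.toStr n ++ ")" := by
  unfold pvSuffixNum pvMidNum at h
  split_ifs at h with hc1 hc2
  simp only [Bool.and_eq_true, List.isPrefixOf_iff_prefix, beq_iff_eq] at hc1
  simp only [Bool.and_eq_true, Bool.not_eq_true', List.isEmpty_eq_false_iff, bne_iff_ne, ne_eq,
    List.all_eq_true] at hc2
  obtain ⟨⟨rest, hrest⟩, hlast⟩ := hc1
  have hrne : rest ≠ [] := by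
    intro hr
    subst hr
    rw [List.append_nil] at hrest
    rw [← hrest, List.getLast?_append_of_ne_nil _ (by simp : ([' ', '('] : List Char) ≠ [])] at hlast
    exact absurd hlast (by decide)
  have hrsplit : rest.dropLast ++ [rest.getLast hrne] = rest := List.dropLast_append_getLast hrne
  have hlast2 : rest.getLast? = some ')' := by
    rw [← hrest, List.getLast?_append_of_ne_nil _ hrne] at hlast
    exact hlast
  have hlast' : rest.getLast hrne = ')' := by
    have hx : rest.getLast? = some (rest.getLast hrne) := List.getLast?_eq_some_getLast hrne
    rw [hx] at hlast2
    exact Option.some.inj hlast2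
  have hmid : (v.toList.drop (name.toList ++ [' ', '(']).length).dropLast = rest.dropLast := by
    rw [← hrest, List.drop_left]
  rw [hmid] at hc2 h
  obtain ⟨⟨hne, hdig⟩, hhd⟩ := hc2
  have hfold := pv_foldInt_eq_foldNat rest.dropLast hdig 0
  simp only [Nat.cast_zero] at hfold
  rw [hfold] at h
  have hn : n = ((pvDecNat rest.dropLast : Nat) : Int) := (Option.some.inj h).symm
  have hpos : 1 ≤ pvDecNat rest.dropLast := pv_decNat_pos hne hdig hhd
  have h1n : 1 ≤ n := by omega
  refine ⟨h1n, ?_⟩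
  have htd : Nat.toDigits 10 n.toNat = rest.dropLast := by
    rw [hn, Int.toNat_natCast]
    exact pv_decNat_toDigits hne hdig hhd
  apply String.toList_inj.mp
  rw [pv_toList_encode, pv_toChars_pos h1n, htd, ← hrest,
    List.append_assoc (name.toList ++ [' ', '(']) rest.dropLast [')']]
  congr 1
  rw [← hlast']
  exact hrsplit.symm

lemma pv_mem_iff (name : String) (values : List String) {i : Int} (h : 1 ≤ i) :
    (name ++ " (" ++ PySem.Int.toStr i ++ ")") ∈ values
      ↔ i ∈ values.filterMap (pvSuffixNum (name.toList ++ [' ', '('])) := by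
  rw [List.mem_filterMap]
  constructor
  · intro hin
    exact ⟨_, hin, pv_parse_encode name h⟩
  · rintro ⟨v, hv, hp⟩
    obtain ⟨-, rfl⟩ := pv_parse_sound hp
    exact hv

lemma pv_scan_ge : ∀ (s : List Int) (e : Int), e ≤ pvGapScan e s := by
  intro s
  induction s with
  | nil => intro e; simp [pvGapScan]
  | cons t ts ih =>
    intro e
    simp only [pvGapScan]
    split_ifs with h1 h2
    · have := ih (e + 1); omega
    · exact le_refl e
    · exact ih e

lemma pv_scan_le : ∀ (s : List Int) (e : Int), pvGapScan e s ≤ e + s.length := by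
  intro s
  induction s with
  | nil => intro e; simp [pvGapScan]
  | cons t ts ih =>
    intro e
    simp only [pvGapScan, List.length_cons]
    split_ifs with h1 h2
    · have := ih (e + 1); push_cast at *; omega
    · push_cast; omega
    · have := ih e; push_cast at *; omega

lemma pv_scan_not_mem : ∀ {s : List Int}, s.Pairwise (· < ·) → ∀ e, pvGapScan e s ∉ s := by
  intro s
  induction s with
  | nil => intro _ e; simp
  | cons t ts ih =>
    intro hp e
    rw [List.pairwise_cons] at hp
    simp only [pvGapScan, List.mem_cons, not_or]
    split_ifs with h1 h2
    · have hge := pv_scan_ge ts (e + 1)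
      exact ⟨by omega, ih hp.2 (e + 1)⟩
    · constructor
      · omega
      · intro hmem
        have := hp.1 e hmem
        omega
    · have hge := pv_scan_ge ts e
      exact ⟨by omega, ih hp.2 e⟩

lemma pv_scan_mem_below : ∀ {s : List Int}, s.Pairwise (· < ·) →
    ∀ e y, e ≤ y → y < pvGapScan e s → y ∈ s := by
  intro s
  induction s with
  | nil =>
    intro _ e y hey hlt
    simp only [pvGapScan] at hlt
    omega
  | cons t ts ih =>
    intro hp e y hey hlt
    rw [List.pairwise_cons] at hp
    simp only [pvGapScan] at hlt
    split_ifs at hlt with h1 h2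
    · by_cases hye : y = e
      · subst hye; subst h1; exact List.mem_cons_self
      · exact List.mem_cons_of_mem t (ih hp.2 (e + 1) y (by omega) hlt)
    · omega
    · exact List.mem_cons_of_mem t (ih hp.2 e y hey hlt)

lemma pv_loopA_eq (values : List String) (name : String) :
    ∀ (fuel : Nat) (i m : Int), i ≤ m →
      (name ++ " (" ++ PySem.Int.toStr m ++ ")") ∉ values →
      (∀ j, i ≤ j → j < m → (name ++ " (" ++ PySem.Int.toStr j ++ ")") ∈ values) →
      m - i ≤ (fuel : Int) →
      pvLoopA values name i fuel = name ++ " (" ++ PySem.Int.toStr m ++ ")" := by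
  intro fuel
  induction fuel with
  | zero =>
    intro i m him hnot hall hle
    have : i = m := by push_cast at hle; omega
    subst this
    rfl
  | succ fuel ih =>
    intro i m him hnot hall hle
    simp only [pvLoopA]
    split_ifs with hin
    · have hne : i ≠ m := by
        intro he; subst he; exact hnot hin
      exact ih (i + 1) m (by omega) hnot (fun j h1 h2 => hall j (by omega) h2)
        (by push_cast at *; omega)
    · have : i = m := by
        rcases lt_or_eq_of_le him with hlt | he
        · exact absurd (hall i le_rfl hlt) hin
        · exact he
      rw [this]

-- ===== VERDICT (by name: the statement is the Claim_ definition above) =====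
theorem make_unique_name_py_spec : Claim_equal_make_unique_name_py := by
  intro name dictionary _
  unfold Spec_make_unique_name_py make_unique_name_py make_unique_name_py_alt
  set values := (PySem.Dict.ofList dictionary).values with hv
  set pre := name.toList ++ [' ', '('] with hpre
  set taken := PySem.Set.ofList (values.filterMap (pvSuffixNum pre)) with htk
  set s := PySem.List.sorted taken (fun x => x) false with hs
  set m := pvGapScan 1 s with hm
  have hsorted : s.Pairwise (· < ·) := by
    rw [hs, htk]; exact PySem.List.sorted_ofList_pairwise_lt _
  have hmem : ∀ i : Int, i ∈ s ↔ i ∈ values.filterMap (pvSuffixNum pre) := by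
    intro i
    rw [hs, PySem.List.mem_sorted, htk, PySem.Set.mem_ofList]
  have h1m : 1 ≤ m := pv_scan_ge s 1
  apply pv_loopA_eq values name (values.length + 1) 1 m h1m
  · intro hin
    exact pv_scan_not_mem hsorted 1 ((hmem m).mpr ((pv_mem_iff name values h1m).mp hin))
  · intro j h1j hjm
    exact (pv_mem_iff name values h1j).mpr
      ((hmem j).mp (pv_scan_mem_below hsorted 1 j h1j hjm))
  · have := pv_scan_le s 1
    have hlen : s.length ≤ values.length := by
      rw [hs, PySem.List.length_sorted]
      calc (taken : List Int).length
          ≤ (values.filterMap (pvSuffixNum pre)).length := by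
            rw [htk]
            exact (List.subperm_of_subset (PySem.Set.nodup_ofList _)
              (fun x hx => (PySem.Set.mem_ofList _ _).mp hx)).length_le
        _ ≤ values.length := List.length_filterMap_le _ _
    push_cast
    omega
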